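-- pv_equiv track=rewrite | github.com/arthexis/arthexis | apps/skills/packages/operator-framework-core/skills/arthexis-pr-oversee/scripts/pr_dependency_pair.py | starts_with_version
-- ===== SOURCE A (Python) =====
-- def starts_with_version(value: str) -> bool:
--     normalized = value.lower().removeprefix("v")
--     version_chars = []
--     for char in normalized:
--         if char.isdigit() or char == ".":
--             version_chars.append(char)
--             continue
--         break
--     version = "".join(version_chars)
--     return "." in version and all(part.isdigit() for part in version.split(".") if part)
-- ===== SOURCE B (Python) =====
-- def starts_with_version(value: str) -> bool:
--     # Skip the leading digit run; the string starts with a version iff the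
--     # next character is a dot.
--     normalized = value.lower().removeprefix("v")
--     i = 0
--     while i < len(normalized) and normalized[i].isdigit():
--         i += 1
--     return i < len(normalized) and normalized[i] == "."
-- ===== Notes on version B (the rewrite author's own statement) =====
-- stated objective: simpler
-- what changed: B drops the collect-join-split-all pipeline: since A's all(part.isdigit()) check over the collected digit/dot run is always true, B just skips the leading digit run and tests whether the next character is a dot.
import Mathlib
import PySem

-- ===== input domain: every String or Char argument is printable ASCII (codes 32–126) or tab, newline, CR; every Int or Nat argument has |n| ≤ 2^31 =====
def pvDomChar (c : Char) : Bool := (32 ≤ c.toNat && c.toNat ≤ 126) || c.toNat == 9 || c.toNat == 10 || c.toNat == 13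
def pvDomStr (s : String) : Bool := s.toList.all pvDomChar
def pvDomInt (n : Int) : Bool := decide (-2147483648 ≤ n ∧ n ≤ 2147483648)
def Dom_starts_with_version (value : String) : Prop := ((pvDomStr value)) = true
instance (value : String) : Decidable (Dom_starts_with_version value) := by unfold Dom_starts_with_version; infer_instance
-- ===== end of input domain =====

-- B replaces A's collect/join/split/all pipeline by a single skip-digits scan
-- (A's all(part.isdigit()) over the collected digit/dot run is always true); objective: simpler.

-- ===== PORT A =====
-- the for-loop with break: collect leading chars that are digits or '.'
def pvLoopA : List Char → List Char
  | [] => []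
  | c :: cs => if PySem.Chars.isdigit c || c == '.' then c :: pvLoopA cs else []

def starts_with_version (value : String) : Bool :=
  -- value.lower().removeprefix("v"): removeprefix ported by hand (exact: drop one leading 'v')
  let lowered := PySem.Chars.lower value.toList
  let normalized : List Char :=
    if PySem.Chars.startswith lowered ['v'] then lowered.drop 1 else lowered
  let version := pvLoopA normalized
  PySem.Chars.isIn ['.'] version &&
    ((PySem.Chars.splitOn version ['.']).filter (fun p => !p.isEmpty)).all PySem.Chars.strIsdigit

-- ===== PORT B =====
-- the while-loop: skip the leading digit run
def pvSkipDigits : List Char → List Char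
  | [] => []
  | c :: cs => if PySem.Chars.isdigit c then pvSkipDigits cs else c :: cs

def starts_with_version_alt (value : String) : Bool :=
  let lowered := PySem.Chars.lower value.toList
  let normalized : List Char :=
    if PySem.Chars.startswith lowered ['v'] then lowered.drop 1 else lowered
  match pvSkipDigits normalized with
  | '.' :: _ => true
  | _ => false

-- ===== PRECONDITION & SPEC =====
def Spec_starts_with_version (value : String) (out : Bool) : Prop := out = starts_with_version_alt value
instance (value : String) (out : Bool) : Decidable (Spec_starts_with_version value out) := by unfold Spec_starts_with_version; infer_instance

-- ===== CLAIM (what is proved, stated in full; the proofs are below) =====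
def Claim_equal_starts_with_version : Prop := ∀ (value : String), Dom_starts_with_version value → Spec_starts_with_version value (starts_with_version value)

-- ===== LEMMAS AND PROOFS =====

-- every char collected by A's loop is a digit or a dot
lemma pvLoopA_chars (l : List Char) : ∀ c ∈ pvLoopA l, PySem.Chars.isdigit c || c == '.' := by
  induction l with
  | nil => simp [pvLoopA]
  | cons x xs ih =>
    simp only [pvLoopA]
    split_ifs with h
    · intro c hc
      rcases List.mem_cons.mp hc with rfl | hc
      · exact h
      · exact ih c hc
    · simp

-- splitOn.go on a digit/dot list produces digit-only parts (given enough fuel and digit-only state)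
lemma pvGo_parts (fuel : Nat) : ∀ (l cur : List Char) (acc : List (List Char)),
    l.length < fuel →
    (∀ c ∈ l, PySem.Chars.isdigit c || c == '.') →
    (∀ c ∈ cur, PySem.Chars.isdigit c = true) →
    (∀ p ∈ acc, ∀ c ∈ p, PySem.Chars.isdigit c = true) →
    ∀ p ∈ PySem.Chars.splitOn.go ['.'] fuel l cur acc, ∀ c ∈ p, PySem.Chars.isdigit c = true := by
  induction fuel with
  | zero => intro l cur acc h; omega
  | succ f ih =>
    intro l cur acc hlen hl hcur hacc
    cases l with
    | nil =>
      simp only [PySem.Chars.splitOn.go]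
      intro p hp
      rw [List.mem_reverse, List.mem_cons] at hp
      rcases hp with rfl | h
      · intro c hc; exact hcur c (List.mem_reverse.mp hc)
      · exact hacc p h
    | cons x xs =>
      simp only [PySem.Chars.splitOn.go]
      split_ifs with hpre
      · -- x = '.', recurse on the dropped tail with empty cur
        apply ih _ [] _
        · simp only [List.length_drop, List.length_cons] at hlen ⊢
          omega
        · intro c hc; exact hl c (List.mem_of_mem_drop hc)
        · simp
        · intro p hp
          rcases List.mem_cons.mp hp with rfl | hp
          · intro c hc; exact hcur c (List.mem_reverse.mp hc)
          · exact hacc p hp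
      · -- x is kept: it is a digit (not a dot since ['.'] is not a prefix)
        have hx : PySem.Chars.isdigit x = true := by
          have hxd := hl x (List.mem_cons_self ..)
          simp only [Bool.or_eq_true, beq_iff_eq] at hxd
          rcases hxd with h | rfl
          · exact h
          · exact absurd (by simp [List.isPrefixOf]) hpre
        apply ih
        · simp only [List.length_cons] at hlen; omega
        · intro c hc; exact hl c (List.mem_cons_of_mem _ hc)
        · intro c hc
          rcases List.mem_cons.mp hc with rfl | hc
          · exact hx
          · exact hcur c hc
        · exact hacc

-- hence A's all(part.isdigit() …) check on the collected run is always true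
lemma pvAllParts (l : List Char) :
    ((PySem.Chars.splitOn (pvLoopA l) ['.']).filter (fun p => !p.isEmpty)).all
      PySem.Chars.strIsdigit = true := by
  rw [List.all_eq_true]
  intro p hp
  have hp' := List.mem_filter.mp hp
  have hdig : ∀ c ∈ p, PySem.Chars.isdigit c = true := by
    have := pvGo_parts ((pvLoopA l).length + 1) (pvLoopA l) [] []
      (by omega) (pvLoopA_chars l) (by simp) (by simp)
    exact this p (by simpa [PySem.Chars.splitOn] using hp'.1)
  simp only [PySem.Chars.strIsdigit, Bool.and_eq_true, List.all_eq_true]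
  exact ⟨by simpa using hp'.2, hdig⟩

-- the collected run contains a dot iff the char after the leading digit run is a dot
lemma pvDotMem (l : List Char) :
    ('.' ∈ pvLoopA l) ↔ (match pvSkipDigits l with | '.' :: _ => true | _ => false) = true := by
  induction l with
  | nil => simp [pvLoopA, pvSkipDigits]
  | cons x xs ih =>
    by_cases hd : PySem.Chars.isdigit x = true
    · have hx : ¬ x = '.' := by
        intro h; subst h; simp [PySem.Chars.isdigit] at hd
      simp only [pvLoopA, pvSkipDigits, hd, Bool.true_or, if_pos trivial]
      rw [List.mem_cons]
      constructor
      · rintro (h | h)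
        · exact absurd h.symm hx
        · exact ih.mp h
      · intro h; exact Or.inr (ih.mpr h)
    · by_cases hx : x = '.'
      · subst hx
        simp [pvLoopA, pvSkipDigits, hd]
      · have : (PySem.Chars.isdigit x || x == '.') = false := by
          simp [hd, hx]
        simp [pvLoopA, pvSkipDigits, hd, hx]

-- membership of the single-char dot as Python's "in"
lemma pvIsInDot (v : List Char) : PySem.Chars.isIn ['.'] v = decide ('.' ∈ v) := by
  by_cases h : '.' ∈ v
  · simp only [h, decide_true]
    rw [PySem.Chars.isIn_iff_infix]
    obtain ⟨s, t, rfl⟩ := List.append_of_mem h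
    exact ⟨s, t, by simp⟩
  · simp only [h, decide_false]
    rw [Bool.eq_false_iff, Ne, PySem.Chars.isIn_iff_infix]
    intro hinf
    exact h (hinf.sublist.mem (List.mem_singleton_self _))

-- the two loop results agree on every char list
lemma pvMain (n : List Char) :
    (PySem.Chars.isIn ['.'] (pvLoopA n) &&
      ((PySem.Chars.splitOn (pvLoopA n) ['.']).filter (fun p => !p.isEmpty)).all
        PySem.Chars.strIsdigit) =
    (match pvSkipDigits n with | '.' :: _ => true | _ => false) := by
  rw [pvIsInDot, pvAllParts, Bool.and_true]
  by_cases h : '.' ∈ pvLoopA n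
  · simp [h, (pvDotMem n).mp h]
  · have hb := (pvDotMem n).not.mp h
    simp only [h, decide_false]
    cases hm : pvSkipDigits n with
    | nil => rfl
    | cons c cs =>
      by_cases hc : c = '.'
      · subst hc; rw [hm] at hb; simp at hb
      · simp [hc]

-- ===== VERDICT (by name: the statement is the Claim_ definition above) =====
theorem starts_with_version_spec : Claim_equal_starts_with_version := by
  intro value _
  unfold Spec_starts_with_version starts_with_version starts_with_version_alt
  exact pvMain _
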